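-- pv_equiv track=rewrite | github.com/NaomiKriger/fruit_ninja_geekcon | src/utils.py | get_darkness_blobs_with_noise
-- ===== SOURCE A (Python) =====
-- def get_splitter_index(
--         darkened_pixels: list,
--         allowed_jumps: int,
-- ) -> int:
--     for index, pixel_location in enumerate(darkened_pixels):
--         if index == 0:
--             continue
--         if abs(darkened_pixels[index - 1] - pixel_location) > allowed_jumps:
--             return index
--     return len(darkened_pixels)
--
-- def get_darkness_blobs_with_noise(
--         darkened_pixels: list,
--         allowed_jumps: int = 1,
-- ) -> list:
--     darkness_blobs_with_noise = []
--     current_list = darkened_pixels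
--
--     while len(current_list) > 1:
--         splitter_index = get_splitter_index(current_list, allowed_jumps)
--         darkness_blobs_with_noise.append(current_list[0:splitter_index])
--         current_list = current_list[splitter_index:]
--
--     return darkness_blobs_with_noise
-- ===== SOURCE B (Python) =====
-- def get_darkness_blobs_with_noise(darkened_pixels, allowed_jumps=1):
--     # Single linear scan: build runs while walking once; a run ends where the
--     # consecutive jump exceeds allowed_jumps; the trailing run is kept only if
--     # it has more than one element (as A's while-loop drops a final singleton).
--     blobs = []
--     current = []
--     prev = None
--     for p in darkened_pixels:
--         if prev is not None and abs(prev - p) > allowed_jumps: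
--             blobs.append(current)
--             current = [p]
--         else:
--             current.append(p)
--         prev = p
--     if len(current) > 1:
--         blobs.append(current)
--     return blobs
-- ===== Notes on version B (the rewrite author's own statement) =====
-- stated objective: faster
-- what changed: A repeatedly rescans and re-slices the remaining list to find each next split point (quadratic); B builds all runs in one linear pass over the pixels, appending the trailing run only if it has more than one element.
import Mathlib
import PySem

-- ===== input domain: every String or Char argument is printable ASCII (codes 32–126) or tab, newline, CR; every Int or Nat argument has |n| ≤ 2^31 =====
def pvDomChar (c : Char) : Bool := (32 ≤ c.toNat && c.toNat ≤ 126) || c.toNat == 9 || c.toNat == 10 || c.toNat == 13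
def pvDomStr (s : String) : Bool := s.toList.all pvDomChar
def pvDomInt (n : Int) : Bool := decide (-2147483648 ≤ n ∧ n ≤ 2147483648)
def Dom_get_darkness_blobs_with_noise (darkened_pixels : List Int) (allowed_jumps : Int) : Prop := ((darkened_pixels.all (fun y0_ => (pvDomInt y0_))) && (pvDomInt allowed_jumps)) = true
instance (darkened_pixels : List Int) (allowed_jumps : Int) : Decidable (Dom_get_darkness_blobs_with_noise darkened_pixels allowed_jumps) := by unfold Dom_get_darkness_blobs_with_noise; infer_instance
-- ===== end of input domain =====

-- B replaces A's quadratic rescan-and-reslice loop by one linear scan building the runs directly (return value only; neither version mutates its argument).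

-- ===== PORT A =====
-- helper get_splitter_index: the for-loop over enumerate(darkened_pixels) as structural recursion.
-- darkened_pixels[index - 1] is ported as pyGetD with default 0: the index is always in
-- range here (enumerate indices start at 0 and index == 0 is skipped), so Python never raises.
def pvSplitGo (dp : List Int) (aj : Int) : List (Int × Int) → Int
  | [] => (dp.length : Int)
  | (i, p) :: rest =>
    if i == 0 then pvSplitGo dp aj rest
    else if |PySem.List.pyGetD dp (i - 1) 0 - p| > aj then i
    else pvSplitGo dp aj rest

def get_splitter_index (darkened_pixels : List Int) (allowed_jumps : Int) : Int :=
  pvSplitGo darkened_pixels allowed_jumps (PySem.List.enumerate darkened_pixels)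

-- termination facts for the while-loop: the splitter index is at least 1 on a nonempty list
theorem pvEnum_fst_ge (xs : List Int) : ∀ (s : Int), ∀ q ∈ PySem.List.enumerate xs s, s ≤ q.1 := by
  induction xs with
  | nil => intro s q hq; simp [PySem.List.enumerate_nil] at hq
  | cons x xs ih =>
    intro s q hq
    rw [PySem.List.enumerate_cons] at hq
    rcases List.mem_cons.mp hq with h | h
    · simp [h]
    · have := ih (s + 1) q h; omega

theorem pvSplitGo_ge_one (dp : List Int) (aj : Int) (l : List (Int × Int))
    (hl : ∀ q ∈ l, (0 : Int) ≤ q.1) (hd : 1 ≤ dp.length) :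
    1 ≤ pvSplitGo dp aj l := by
  induction l with
  | nil => simp only [pvSplitGo]; omega
  | cons q rest ih =>
    obtain ⟨i, p⟩ := q
    have hq : (0 : Int) ≤ i := hl (i, p) (by simp)
    have hrest : ∀ q ∈ rest, (0 : Int) ≤ q.1 := fun q hq => hl q (List.mem_cons_of_mem _ hq)
    simp only [pvSplitGo]
    by_cases h1 : (i == 0) = true
    · rw [if_pos h1]; exact ih hrest
    · rw [if_neg h1]
      by_cases h2 : |PySem.List.pyGetD dp (i - 1) 0 - p| > aj
      · rw [if_pos h2]; simp at h1; omega
      · rw [if_neg h2]; exact ih hrest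

theorem get_splitter_index_ge_one (dp : List Int) (aj : Int) (hd : 1 ≤ dp.length) :
    1 ≤ get_splitter_index dp aj := by
  exact pvSplitGo_ge_one dp aj _ (fun q hq => pvEnum_fst_ge dp 0 q hq) hd

-- the while-loop of A, with the accumulator darkness_blobs_with_noise
def pvBlobsLoop (cur : List Int) (aj : Int) (acc : List (List Int)) : List (List Int) :=
  if _h : cur.length > 1 then
    let si := get_splitter_index cur aj
    pvBlobsLoop (PySem.List.slice cur (some si) none) aj
      (acc ++ [PySem.List.slice cur (some 0) (some si)])
  else acc
termination_by cur.length
decreasing_by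
  have h1 : 1 ≤ get_splitter_index cur aj := get_splitter_index_ge_one cur aj (by omega)
  rw [PySem.List.slice_some_none]
  have h2 := PySem.List.clampIdx_le cur.length (get_splitter_index cur aj)
  have h3 : 1 ≤ PySem.List.clampIdx cur.length (get_splitter_index cur aj) := by
    simp only [PySem.List.clampIdx]
    split_ifs <;> omega
  simp only [List.length_drop]
  omega

def get_darkness_blobs_with_noise (darkened_pixels : List Int) (allowed_jumps : Int) : List (List Int) :=
  pvBlobsLoop darkened_pixels allowed_jumps []

-- ===== PORT B =====
-- one step of B's for-loop: state (blobs, current, prev)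
def pvStep (aj : Int) (st : List (List Int) × List Int × Option Int) (p : Int) :
    List (List Int) × List Int × Option Int :=
  match st with
  | (blobs, current, prev) =>
    match prev with
    | some q =>
      if |q - p| > aj then (blobs ++ [current], [p], some p)
      else (blobs, current ++ [p], some p)
    | none => (blobs, current ++ [p], some p)

def get_darkness_blobs_with_noise_alt (darkened_pixels : List Int) (allowed_jumps : Int) : List (List Int) :=
  let st := darkened_pixels.foldl (pvStep allowed_jumps) ([], [], none)
  if st.2.1.length > 1 then st.1 ++ [st.2.1] else st.1

-- ===== PRECONDITION & SPEC =====
def Spec_get_darkness_blobs_with_noise (darkened_pixels : List Int) (allowed_jumps : Int) (out : List (List Int)) : Prop := out = get_darkness_blobs_with_noise_alt darkened_pixels allowed_jumps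
instance (darkened_pixels : List Int) (allowed_jumps : Int) (out : List (List Int)) : Decidable (Spec_get_darkness_blobs_with_noise darkened_pixels allowed_jumps out) := by unfold Spec_get_darkness_blobs_with_noise; infer_instance

-- ===== CLAIM (what is proved, stated in full; the proofs are below) =====
def Claim_equal_get_darkness_blobs_with_noise : Prop := ∀ (darkened_pixels : List Int) (allowed_jumps : Int), Dom_get_darkness_blobs_with_noise darkened_pixels allowed_jumps → Spec_get_darkness_blobs_with_noise darkened_pixels allowed_jumps (get_darkness_blobs_with_noise darkened_pixels allowed_jumps)

-- ===== LEMMAS AND PROOFS =====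

-- the maximal run continuing from `prev`, and the remainder after it
def takeRun (aj prev : Int) : List Int → List Int
  | [] => []
  | y :: ys => if |prev - y| > aj then [] else y :: takeRun aj y ys

def dropRun (aj prev : Int) : List Int → List Int
  | [] => []
  | y :: ys => if |prev - y| > aj then y :: ys else dropRun aj y ys

theorem takeRun_append_dropRun (aj : Int) : ∀ (l : List Int) (prev : Int),
    takeRun aj prev l ++ dropRun aj prev l = l := by
  intro l
  induction l with
  | nil => intro prev; simp [takeRun, dropRun]
  | cons y ys ih =>
    intro prev
    simp only [takeRun, dropRun]
    split_ifs with h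
    · simp
    · simp [ih y]

theorem length_dropRun_le (aj : Int) : ∀ (l : List Int) (prev : Int),
    (dropRun aj prev l).length ≤ l.length := by
  intro l
  induction l with
  | nil => intro prev; simp [dropRun]
  | cons y ys ih =>
    intro prev
    simp only [dropRun]
    split_ifs with h
    · simp
    · have := ih y; simp; omega

-- the reference splitting both programs compute
def blobsRef (aj : Int) : List Int → List (List Int)
  | [] => []
  | [_] => []
  | x :: y :: xs =>
    (x :: takeRun aj x (y :: xs)) :: blobsRef aj (dropRun aj x (y :: xs))
termination_by l => l.length
decreasing_by
  have := length_dropRun_le aj (y :: xs) x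
  simp at this ⊢
  omega

-- ===== A-side: the splitter index is 1 + length of the first run =====
theorem pvSplitGo_enum (dp : List Int) (aj : Int) : ∀ (ys : List Int) (k : Nat) (prev : Int),
    1 ≤ k → dp.drop (k - 1) = prev :: ys →
    pvSplitGo dp aj (PySem.List.enumerate ys (k : Int)) = (k : Int) + (takeRun aj prev ys).length := by
  intro ys
  induction ys with
  | nil =>
    intro k prev hk hdrop
    have hlen : dp.length = k := by
      have := congrArg List.length hdrop
      simp at this
      omega
    simp [PySem.List.enumerate_nil, pvSplitGo, takeRun, hlen]
  | cons y ys ih =>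
    intro k prev hk hdrop
    rw [PySem.List.enumerate_cons]
    have hk0 : ((k : Int) == 0) = false := by simp; omega
    have hget : PySem.List.pyGetD dp ((k : Int) - 1) 0 = prev := by
      have hcast : ((k : Int) - 1) = ((k - 1 : Nat) : Int) := by omega
      rw [hcast, PySem.List.pyGetD_natCast]
      have hsome : dp[k - 1]? = some prev := by
        have h0 : (dp.drop (k - 1))[0]? = some prev := by rw [hdrop]; rfl
        rwa [List.getElem?_drop, Nat.add_zero] at h0
      simp [List.getD, hsome]
    simp only [pvSplitGo, hk0, Bool.false_eq_true, if_false, hget]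
    by_cases h : |prev - y| > aj
    · rw [if_pos h]
      simp only [takeRun]
      rw [if_pos h]
      simp
    · rw [if_neg h]
      have hdrop' : dp.drop k = y :: ys := by
        have hdd : dp.drop k = (dp.drop (k - 1)).drop 1 := by
          rw [List.drop_drop]
          congr 1
          omega
        rw [hdd, hdrop]
        rfl
      have hih := ih (k + 1) y (by omega) (by simpa using hdrop')
      push_cast at hih ⊢
      rw [hih]
      simp only [takeRun]
      rw [if_neg h]
      simp
      omega

theorem get_splitter_index_eq (aj x : Int) (xs : List Int) :
    get_splitter_index (x :: xs) aj = 1 + ((takeRun aj x xs).length : Int) := by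
  unfold get_splitter_index
  rw [show PySem.List.enumerate (x :: xs) = (0, x) :: PySem.List.enumerate xs 1 from
    PySem.List.enumerate_cons x xs 0]
  simp only [pvSplitGo, beq_self_eq_true, if_true]
  have := pvSplitGo_enum (x :: xs) aj xs 1 x (by omega) (by simp)
  simpa using this

-- takeRun is a prefix of the list
theorem take_takeRun (aj : Int) (l : List Int) (prev : Int) :
    l.take (takeRun aj prev l).length = takeRun aj prev l := by
  nth_rewrite 2 [← takeRun_append_dropRun aj l prev]
  exact List.take_left

theorem drop_takeRun (aj : Int) (l : List Int) (prev : Int) :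
    l.drop (takeRun aj prev l).length = dropRun aj prev l := by
  nth_rewrite 2 [← takeRun_append_dropRun aj l prev]
  exact List.drop_left

-- ===== A's loop computes blobsRef =====
theorem pvBlobsLoop_eq_aux (aj : Int) : ∀ (n : Nat) (cur : List Int), cur.length ≤ n →
    ∀ (acc : List (List Int)), pvBlobsLoop cur aj acc = acc ++ blobsRef aj cur := by
  intro n
  induction n with
  | zero =>
    intro cur hn acc
    have : cur = [] := by
      cases cur with
      | nil => rfl
      | cons a b => simp at hn
    subst this
    rw [pvBlobsLoop]
    simp [blobsRef]
  | succ n ihn =>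
    intro cur hn acc
    match cur with
    | [] => rw [pvBlobsLoop]; simp [blobsRef]
    | [a] => rw [pvBlobsLoop]; simp [blobsRef]
    | x :: y :: xs =>
      rw [pvBlobsLoop]
      have hlen : (x :: y :: xs).length > 1 := by simp
      rw [dif_pos hlen]
      show pvBlobsLoop (PySem.List.slice (x :: y :: xs)
          (some (get_splitter_index (x :: y :: xs) aj)) none) aj
        (acc ++ [PySem.List.slice (x :: y :: xs) (some 0)
          (some (get_splitter_index (x :: y :: xs) aj))]) = acc ++ blobsRef aj (x :: y :: xs)
      have hsi : get_splitter_index (x :: y :: xs) aj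
          = 1 + ((takeRun aj x (y :: xs)).length : Int) := get_splitter_index_eq aj x (y :: xs)
      have hnn : (0 : Int) ≤ get_splitter_index (x :: y :: xs) aj := by rw [hsi]; positivity
      have htoNat : (get_splitter_index (x :: y :: xs) aj).toNat
          = 1 + (takeRun aj x (y :: xs)).length := by omega
      have hslice1 : PySem.List.slice (x :: y :: xs) (some 0)
          (some (get_splitter_index (x :: y :: xs) aj)) = x :: takeRun aj x (y :: xs) := by
        rw [PySem.List.slice_zero_start, PySem.List.slice_to, htoNat]
        · rw [show (1 + (takeRun aj x (y :: xs)).length) = (takeRun aj x (y :: xs)).length + 1 by omega]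
          simp only [List.take_succ_cons]
          rw [take_takeRun]
        · exact hnn
      have hslice2 : PySem.List.slice (x :: y :: xs)
          (some (get_splitter_index (x :: y :: xs) aj)) none = dropRun aj x (y :: xs) := by
        rw [PySem.List.slice_from, htoNat]
        · rw [show (1 + (takeRun aj x (y :: xs)).length) = (takeRun aj x (y :: xs)).length + 1 by omega]
          simp only [List.drop_succ_cons]
          rw [drop_takeRun]
        · exact hnn
      rw [hslice1, hslice2]
      have hrest : (dropRun aj x (y :: xs)).length ≤ n := by
        have := length_dropRun_le aj (y :: xs) x
        simp at this hn
        omega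
      rw [ihn _ hrest]
      rw [blobsRef]
      simp

theorem pvBlobsLoop_eq (aj : Int) (cur : List Int) (acc : List (List Int)) :
    pvBlobsLoop cur aj acc = acc ++ blobsRef aj cur :=
  pvBlobsLoop_eq_aux aj cur.length cur le_rfl acc

-- ===== B-side: the fold computes blobsAux =====
def pvFinish (st : List (List Int) × List Int × Option Int) : List (List Int) :=
  if st.2.1.length > 1 then st.1 ++ [st.2.1] else st.1

def blobsAux (aj : Int) (prev : Int) (cur : List Int) : List Int → List (List Int)
  | [] => if cur.length > 1 then [cur] else []
  | p :: l =>
    if |prev - p| > aj then cur :: blobsAux aj p [p] l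
    else blobsAux aj p (cur ++ [p]) l

theorem foldl_pvStep_eq (aj : Int) : ∀ (l : List Int) (blobs : List (List Int)) (cur : List Int) (prev : Int),
    pvFinish (l.foldl (pvStep aj) (blobs, cur, some prev)) = blobs ++ blobsAux aj prev cur l := by
  intro l
  induction l with
  | nil =>
    intro blobs cur prev
    simp only [List.foldl_nil, blobsAux, pvFinish]
    split_ifs <;> simp
  | cons p l ih =>
    intro blobs cur prev
    simp only [List.foldl_cons, pvStep, blobsAux]
    by_cases h : |prev - p| > aj
    · rw [if_pos h, if_pos h, ih (blobs ++ [cur]) [p] p]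
      simp
    · rw [if_neg h, if_neg h, ih blobs (cur ++ [p]) p]

-- ===== blobsAux computes blobsRef =====
theorem blobsAux_gen (aj : Int) : ∀ (l : List Int) (cur : List Int) (prev : Int),
    blobsAux aj prev (cur ++ [prev]) l =
      (match dropRun aj prev l with
       | [] => if (cur ++ [prev] ++ takeRun aj prev l).length > 1 then [cur ++ [prev] ++ takeRun aj prev l] else []
       | y :: ys => (cur ++ [prev] ++ takeRun aj prev l) :: blobsAux aj y [y] ys) := by
  intro l
  induction l with
  | nil => intro cur prev; simp [blobsAux, dropRun, takeRun]
  | cons p l ih =>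
    intro cur prev
    by_cases h : |prev - p| > aj
    · simp only [blobsAux, takeRun, dropRun, if_pos h]
      simp
    · simp only [blobsAux, takeRun, dropRun, if_neg h]
      rw [show cur ++ [prev] ++ [p] = (cur ++ [prev]) ++ [p] by simp, ih (cur ++ [prev]) p]
      have hL : (cur ++ [prev]) ++ [p] ++ takeRun aj p l = cur ++ [prev] ++ p :: takeRun aj p l := by
        simp
      rw [hL]

theorem blobsAux_eq_blobsRef (aj : Int) : ∀ (n : Nat) (xs : List Int), xs.length ≤ n →
    ∀ (x : Int), blobsAux aj x [x] xs = blobsRef aj (x :: xs) := by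
  intro n
  induction n with
  | zero =>
    intro xs hn x
    have : xs = [] := by
      cases xs with
      | nil => rfl
      | cons a b => simp at hn
    subst this
    simp [blobsAux, blobsRef]
  | succ n ihn =>
    intro xs hn x
    match xs with
    | [] => simp [blobsAux, blobsRef]
    | y :: ys =>
      rw [blobsRef]
      by_cases h : |x - y| > aj
      · simp only [blobsAux, takeRun, dropRun, if_pos h]
        rw [ihn ys (by simp at hn; omega) y]
      · simp only [blobsAux, takeRun, dropRun, if_neg h, List.cons_append, List.nil_append]
        have hgen := blobsAux_gen aj ys [x] y
        simp only [List.cons_append, List.nil_append] at hgen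
        rw [hgen]
        rcases hdr : dropRun aj y ys with _ | ⟨z, zs⟩
        · have hlen : ([x, y] ++ takeRun aj y ys).length > 1 := by simp
          rw [if_pos (by simp)]
          simp [blobsRef]
        · have hzs : zs.length ≤ n := by
            have h1 := length_dropRun_le aj ys y
            rw [hdr] at h1
            simp at h1 hn
            omega
          dsimp only
          rw [ihn zs hzs z]

-- ===== VERDICT (by name: the statement is the Claim_ definition above) =====
theorem get_darkness_blobs_with_noise_spec : Claim_equal_get_darkness_blobs_with_noise := by
  intro dp aj _
  unfold Spec_get_darkness_blobs_with_noise
  unfold get_darkness_blobs_with_noise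
  rw [pvBlobsLoop_eq]
  have halt : get_darkness_blobs_with_noise_alt dp aj
      = pvFinish (dp.foldl (pvStep aj) ([], [], none)) := rfl
  rw [halt]
  cases dp with
  | nil => simp [blobsRef, pvFinish]
  | cons x xs =>
    have hstep : pvStep aj ([], [], none) x = ([], [x], some x) := by simp [pvStep]
    rw [List.foldl_cons, hstep, foldl_pvStep_eq aj xs [] [x] x,
      blobsAux_eq_blobsRef aj xs.length xs le_rfl x]
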